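-- pv_equiv track=rewrite | github.com/wgh1992/TourRAG | scripts/generate_visual_tags_from_images.py | _build_common_fallback_tags
-- ===== SOURCE A (Python) =====
-- from typing import Dict, Any, List, Optional, Tuple
--
-- def _build_common_fallback_tags(
--     valid_visual_tags: List[str],
--     valid_scene_tags: List[str],
--     valid_category_tags: List[str],
--     valid_country_tags: List[str],
--     limit: int = 100
-- ) -> List[str]:
--     """Provide common allowed tags for prompt-only fallback."""
--     preferred = [
--         # Scene tags
--         "exterior", "interior", "ground_level", "panoramic", "aerial",
--         "sunrise", "sunset", "skyline_view", "hiking_trail",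
--         "close_up", "crowded", "empty", "festival", "ceremony",
--         # Visual tags
--         "sunny", "cloudy", "rainy", "foggy", "snowy", "night_view",
--         "spring_greenery", "summer_lush", "autumn_foliage", "winter_barren",
--         "cherry_blossom", "blooming_flowers", "falling_leaves",
--         "snow_peak", "ice",
--         # Common categories
--         "mountain", "lake", "temple", "museum", "park", "coast", "cityscape",
--         "monument", "bridge", "palace", "tower", "cave", "waterfall", "valley", "island",
--         # Common countries (only used if present in allowed tags)
--         "china", "japan", "south_korea", "india", "thailand", "vietnam", "singapore",
--         "malaysia", "indonesia", "philippines", "united_states", "canada", "mexico",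
--         "united_kingdom", "france", "germany", "italy", "spain", "portugal", "greece",
--         "australia", "new_zealand", "brazil", "argentina", "chile", "peru", "egypt",
--         "south_africa", "morocco", "turkey", "saudi_arabia", "uae", "israel", "russia"
--     ]
--     allowed = set(valid_visual_tags + valid_scene_tags + valid_category_tags + valid_country_tags)
--     ordered = [t for t in preferred if t in allowed]
--     for t in valid_scene_tags + valid_visual_tags + valid_category_tags + valid_country_tags:
--         if t in allowed and t not in ordered:
--             ordered.append(t)
--     return ordered[:limit]
-- ===== SOURCE B (Python) =====
-- from typing import List
--
-- def _build_common_fallback_tags(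
--     valid_visual_tags: List[str],
--     valid_scene_tags: List[str],
--     valid_category_tags: List[str],
--     valid_country_tags: List[str],
--     limit: int = 100
-- ) -> List[str]:
--     """Provide common allowed tags for prompt-only fallback.
--
--     Rank-table formulation: record each tag's first-occurrence index in
--     preferred + scene + visual + category + country, then sort the allowed
--     set by that rank and slice to the limit.
--     """
--     preferred = [
--         "exterior", "interior", "ground_level", "panoramic", "aerial",
--         "sunrise", "sunset", "skyline_view", "hiking_trail",
--         "close_up", "crowded", "empty", "festival", "ceremony",
--         "sunny", "cloudy", "rainy", "foggy", "snowy", "night_view",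
--         "spring_greenery", "summer_lush", "autumn_foliage", "winter_barren",
--         "cherry_blossom", "blooming_flowers", "falling_leaves",
--         "snow_peak", "ice",
--         "mountain", "lake", "temple", "museum", "park", "coast", "cityscape",
--         "monument", "bridge", "palace", "tower", "cave", "waterfall", "valley", "island",
--         "china", "japan", "south_korea", "india", "thailand", "vietnam", "singapore",
--         "malaysia", "indonesia", "philippines", "united_states", "canada", "mexico",
--         "united_kingdom", "france", "germany", "italy", "spain", "portugal", "greece",
--         "australia", "new_zealand", "brazil", "argentina", "chile", "peru", "egypt",
--         "south_africa", "morocco", "turkey", "saudi_arabia", "uae", "israel", "russia"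
--     ]
--     rank = {}
--     for i, t in enumerate(preferred + valid_scene_tags + valid_visual_tags
--                           + valid_category_tags + valid_country_tags):
--         rank.setdefault(t, i)
--     allowed = set(valid_visual_tags + valid_scene_tags
--                   + valid_category_tags + valid_country_tags)
--     # every allowed tag occurs in the enumerated concatenation, so rank[t] exists
--     return sorted(allowed, key=rank.__getitem__)[:limit]
-- ===== Notes on version B (the rewrite author's own statement) =====
-- stated objective: faster
-- what changed: Replaces A's two-phase filter-then-append-dedup scan (with a linear 'not in ordered' list-membership test inside the loop) by building a first-occurrence rank table with dict.setdefault over the full concatenation and returning the allowed set sorted by rank, sliced to limit.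
import Mathlib
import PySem

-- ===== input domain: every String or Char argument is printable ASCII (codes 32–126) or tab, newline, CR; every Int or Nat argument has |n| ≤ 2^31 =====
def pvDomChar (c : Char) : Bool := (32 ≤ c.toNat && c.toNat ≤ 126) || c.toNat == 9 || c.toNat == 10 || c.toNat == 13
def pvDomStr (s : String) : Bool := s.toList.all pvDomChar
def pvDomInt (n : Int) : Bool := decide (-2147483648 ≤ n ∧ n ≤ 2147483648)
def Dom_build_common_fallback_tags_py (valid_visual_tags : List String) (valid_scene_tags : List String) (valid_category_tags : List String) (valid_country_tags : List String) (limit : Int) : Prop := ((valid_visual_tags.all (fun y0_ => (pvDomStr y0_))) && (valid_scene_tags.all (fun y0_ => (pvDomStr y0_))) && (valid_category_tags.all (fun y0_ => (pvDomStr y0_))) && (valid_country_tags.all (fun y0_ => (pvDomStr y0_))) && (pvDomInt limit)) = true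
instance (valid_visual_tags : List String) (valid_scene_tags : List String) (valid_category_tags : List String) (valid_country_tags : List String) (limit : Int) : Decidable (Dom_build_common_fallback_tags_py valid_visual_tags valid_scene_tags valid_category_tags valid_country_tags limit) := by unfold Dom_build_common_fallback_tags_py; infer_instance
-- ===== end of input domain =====

-- B replaces A's filter-then-append-dedup scan (quadratic 'not in ordered' list test) by a
-- first-occurrence rank table plus a sort of the allowed set by rank (objective: faster; measured).

-- ===== PORT A =====
-- the literal 'preferred' list of the Python source (identical in A and B)
def preferredTags : List String := [
  "exterior", "interior", "ground_level", "panoramic", "aerial",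
  "sunrise", "sunset", "skyline_view", "hiking_trail",
  "close_up", "crowded", "empty", "festival", "ceremony",
  "sunny", "cloudy", "rainy", "foggy", "snowy", "night_view",
  "spring_greenery", "summer_lush", "autumn_foliage", "winter_barren",
  "cherry_blossom", "blooming_flowers", "falling_leaves",
  "snow_peak", "ice",
  "mountain", "lake", "temple", "museum", "park", "coast", "cityscape",
  "monument", "bridge", "palace", "tower", "cave", "waterfall", "valley", "island",
  "china", "japan", "south_korea", "india", "thailand", "vietnam", "singapore",
  "malaysia", "indonesia", "philippines", "united_states", "canada", "mexico",
  "united_kingdom", "france", "germany", "italy", "spain", "portugal", "greece",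
  "australia", "new_zealand", "brazil", "argentina", "chile", "peru", "egypt",
  "south_africa", "morocco", "turkey", "saudi_arabia", "uae", "israel", "russia"]

def build_common_fallback_tags_py (valid_visual_tags : List String) (valid_scene_tags : List String) (valid_category_tags : List String) (valid_country_tags : List String) (limit : Int) : List String :=
  let allowed : PySem.Set String :=
    PySem.Set.ofList (valid_visual_tags ++ valid_scene_tags ++ valid_category_tags ++ valid_country_tags)
  let ordered := preferredTags.filter (fun t => PySem.Set.contains allowed t)
  let ordered := (valid_scene_tags ++ valid_visual_tags ++ valid_category_tags ++ valid_country_tags).foldl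
    (fun acc t => if PySem.Set.contains allowed t && !(acc.contains t) then acc ++ [t] else acc) ordered
  PySem.List.slice ordered none (some limit)

-- ===== PORT B =====
def build_common_fallback_tags_py_alt (valid_visual_tags : List String) (valid_scene_tags : List String) (valid_category_tags : List String) (valid_country_tags : List String) (limit : Int) : List String :=
  let rank : PySem.Dict String Int :=
    (PySem.List.enumerate (preferredTags ++ valid_scene_tags ++ valid_visual_tags ++ valid_category_tags ++ valid_country_tags) 0).foldl
      (fun d p => d.setdefault p.2 p.1) PySem.Dict.empty
  let allowed : PySem.Set String :=
    PySem.Set.ofList (valid_visual_tags ++ valid_scene_tags ++ valid_category_tags ++ valid_country_tags)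
  -- rank[t]: every allowed tag occurs in the enumerated concatenation, so the dict lookup never
  -- misses and the getD default 0 is never read (Python's rank.__getitem__ never raises here)
  PySem.List.slice (PySem.List.sorted allowed (fun t => rank.getD t 0) false) none (some limit)

-- ===== PRECONDITION & SPEC =====
def Spec_build_common_fallback_tags_py (valid_visual_tags : List String) (valid_scene_tags : List String) (valid_category_tags : List String) (valid_country_tags : List String) (limit : Int) (out : List String) : Prop := out = build_common_fallback_tags_py_alt valid_visual_tags valid_scene_tags valid_category_tags valid_country_tags limit
instance (valid_visual_tags : List String) (valid_scene_tags : List String) (valid_category_tags : List String) (valid_country_tags : List String) (limit : Int) (out : List String) : Decidable (Spec_build_common_fallback_tags_py valid_visual_tags valid_scene_tags valid_category_tags valid_country_tags limit out) := by unfold Spec_build_common_fallback_tags_py; infer_instance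

-- ===== CLAIM (what is proved, stated in full; the proofs are below) =====
def Claim_equal_build_common_fallback_tags_py : Prop := ∀ (valid_visual_tags : List String) (valid_scene_tags : List String) (valid_category_tags : List String) (valid_country_tags : List String) (limit : Int), Dom_build_common_fallback_tags_py valid_visual_tags valid_scene_tags valid_category_tags valid_country_tags limit → Spec_build_common_fallback_tags_py valid_visual_tags valid_scene_tags valid_category_tags valid_country_tags limit (build_common_fallback_tags_py valid_visual_tags valid_scene_tags valid_category_tags valid_country_tags limit)

-- ===== LEMMAS AND PROOFS =====

-- a ∈ l gives idxOf? as some of idxOf (small glue fact; cites List.isSome_idxOf? / idxOf_eq_getD_idxOf?)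
theorem idxOf?_of_mem (a : String) (l : List String) (h : a ∈ l) :
    List.idxOf? a l = some (l.idxOf a) := by
  have h1 : (List.idxOf? a l).isSome := by simp [List.isSome_idxOf?, h]
  obtain ⟨k, hk⟩ := Option.isSome_iff_exists.mp h1
  rw [hk, List.idxOf_eq_getD_idxOf?, hk]
  rfl

-- the setdefault fold keeps the FIRST index of each element
theorem rank_fold_get? (xs : List String) (s : Int) (d : PySem.Dict String Int) (t : String) :
    ((PySem.List.enumerate xs s).foldl (fun d p => d.setdefault p.2 p.1) d).get? t
      = ((d.get? t).or ((List.idxOf? t xs).map (fun k => s + (k : Int)))) := by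
  induction xs generalizing s d with
  | nil => simp [PySem.List.enumerate]
  | cons x xs ih =>
    rw [PySem.List.enumerate_cons]
    simp only [List.foldl_cons]
    rw [ih]
    by_cases hx : x = t
    · subst hx
      rw [PySem.Dict.get?_setdefault_self]
      cases hd : d.get? x with
      | none => simp [List.idxOf?_cons]
      | some v => simp
    · rw [PySem.Dict.get?_setdefault_of_ne _ _ (fun h => hx h.symm)]
      have hbe : (x == t) = false := by simp [hx]
      rw [List.idxOf?_cons, hbe]
      cases hd : d.get? t with
      | some v => simp
      | none =>
        cases hidx : List.idxOf? t xs with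
        | none => simp
        | some k =>
          simp
          ring

-- A's dedup fold over a nodup list with a disjoint accumulator is filter
theorem dedup_fold_nodup (P : String → Bool) :
    ∀ (xs acc : List String), xs.Nodup → (∀ t ∈ xs, t ∉ acc) →
      xs.foldl (fun acc t => if P t && !(acc.contains t) then acc ++ [t] else acc) acc
        = acc ++ xs.filter P := by
  intro xs
  induction xs with
  | nil => simp
  | cons x xs ih =>
    intro acc hnd hdisj
    have hxacc : x ∉ acc := hdisj x (by simp)
    have hcont : (acc.contains x) = false := by simpa using hxacc
    simp only [List.foldl_cons, hcont, Bool.not_false, Bool.and_true]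
    have hnd' := (List.nodup_cons.mp hnd).2
    have hxs : x ∉ xs := (List.nodup_cons.mp hnd).1
    by_cases hP : P x = true
    · rw [if_pos hP]
      rw [ih (acc ++ [x]) hnd' (by
        intro t ht
        simp only [List.mem_append, List.mem_singleton]
        rintro (h | rfl)
        · exact hdisj t (by simp [ht]) h
        · exact hxs ht)]
      simp [hP]
    · rw [if_neg hP]
      rw [ih acc hnd' (fun t ht => hdisj t (by simp [ht]))]
      simp [hP]

-- invariant of A's dedup fold: membership and strictly increasing first-occurrence indices
theorem dedup_fold_spec (P : String → Bool) (full : List String) :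
    ∀ (suf pre acc : List String), full = pre ++ suf →
      (∀ x, x ∈ acc ↔ P x = true ∧ x ∈ pre) →
      acc.Pairwise (fun a b => full.idxOf a < full.idxOf b) →
      (∀ x, x ∈ suf.foldl (fun acc t => if P t && !(acc.contains t) then acc ++ [t] else acc) acc
            ↔ P x = true ∧ x ∈ full) ∧
      (suf.foldl (fun acc t => if P t && !(acc.contains t) then acc ++ [t] else acc) acc).Pairwise
        (fun a b => full.idxOf a < full.idxOf b) := by
  intro suf
  induction suf with
  | nil =>
    intro pre acc hfull hmem hpair
    simp only [List.foldl_nil]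
    refine ⟨?_, hpair⟩
    intro x
    rw [hmem x, hfull]
    simp
  | cons t suf ih =>
    intro pre acc hfull hmem hpair
    simp only [List.foldl_cons]
    by_cases hg : (P t && !(acc.contains t)) = true
    · rw [if_pos hg]
      have hPt : P t = true := (Bool.and_eq_true _ _ |>.mp hg).1
      have htacc : t ∉ acc := by
        have := (Bool.and_eq_true _ _ |>.mp hg).2
        simpa using this
      have htpre : t ∉ pre := fun h => htacc ((hmem t).mpr ⟨hPt, h⟩)
      refine ih (pre ++ [t]) (acc ++ [t]) (by rw [hfull]; simp) ?_ ?_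
      · intro x
        simp only [List.mem_append, List.mem_singleton]
        constructor
        · rintro (h | rfl)
          · obtain ⟨h1, h2⟩ := (hmem x).mp h
            exact ⟨h1, Or.inl h2⟩
          · exact ⟨hPt, Or.inr rfl⟩
        · rintro ⟨h1, h2 | rfl⟩
          · exact Or.inl ((hmem x).mpr ⟨h1, h2⟩)
          · exact Or.inr rfl
      · rw [List.pairwise_append]
        refine ⟨hpair, by simp, ?_⟩
        intro a ha b hb
        simp only [List.mem_singleton] at hb
        subst hb
        have hapre : a ∈ pre := ((hmem a).mp ha).2
        have h1 : full.idxOf a < pre.length := by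
          rw [hfull, List.idxOf_append_of_mem hapre]
          exact List.idxOf_lt_length_of_mem hapre
        have h2 : pre.length ≤ full.idxOf b := by
          rw [hfull, List.idxOf_append_of_notMem htpre]
          omega
        omega
    · rw [if_neg hg]
      refine ih (pre ++ [t]) acc (by rw [hfull]; simp) ?_ hpair
      intro x
      rw [hmem x]
      simp only [List.mem_append, List.mem_singleton]
      constructor
      · rintro ⟨h1, h2⟩
        exact ⟨h1, Or.inl h2⟩
      · rintro ⟨h1, h2 | rfl⟩
        · exact ⟨h1, h2⟩
        · -- the guard failed: P x = false or x ∈ acc; with P x = true, x ∈ acc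
          refine ⟨h1, ?_⟩
          have hxacc : x ∈ acc := by
            by_contra hxa
            exact hg (by simp [h1, hxa])
          exact ((hmem x).mp hxacc).2

theorem preferredTags_nodup : preferredTags.Nodup := by decide

-- ===== VERDICT (by name: the statement is the Claim_ definition above) =====
theorem build_common_fallback_tags_py_spec : Claim_equal_build_common_fallback_tags_py := by
  intro vv vs vc vk limit _
  unfold Spec_build_common_fallback_tags_py
  unfold build_common_fallback_tags_py build_common_fallback_tags_py_alt
  simp only []
  set rest4 := vv ++ vs ++ vc ++ vk with hrest4
  set restL := vs ++ vv ++ vc ++ vk with hrestL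
  set allowed : PySem.Set String := PySem.Set.ofList rest4 with hallowed
  set P : String → Bool := fun t => PySem.Set.contains allowed t with hP
  set concat := preferredTags ++ restL with hconcat
  -- A's ordered list, as one dedup fold over the whole concatenation
  have hfilter : preferredTags.filter P
      = preferredTags.foldl (fun acc t => if P t && !(acc.contains t) then acc ++ [t] else acc) [] := by
    rw [dedup_fold_nodup P preferredTags [] preferredTags_nodup (by simp)]
    simp
  set L := restL.foldl (fun acc t => if P t && !(acc.contains t) then acc ++ [t] else acc)
      (preferredTags.filter P) with hL
  have hLconcat : L = concat.foldl (fun acc t => if P t && !(acc.contains t) then acc ++ [t] else acc) [] := by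
    simp [hL, hfilter, hconcat, hrestL, List.foldl_append]
  have hspec := dedup_fold_spec P concat concat [] [] (by simp) (by simp) (by simp)
  rw [← hLconcat] at hspec
  obtain ⟨hmem, hpair⟩ := hspec
  -- membership of L is exactly the allowed set
  have hmemA : ∀ x, x ∈ L ↔ x ∈ allowed := by
    intro x
    rw [hmem x]
    constructor
    · rintro ⟨h1, _⟩
      exact (PySem.Set.contains_iff allowed x).mp h1
    · intro h
      refine ⟨(PySem.Set.contains_iff allowed x).mpr h, ?_⟩
      have : x ∈ rest4 := (PySem.Set.mem_ofList rest4 x).mp h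
      rw [hconcat, hrestL]
      rw [hrest4] at this
      simp only [List.mem_append] at this ⊢
      tauto
  have hLsub : ∀ x ∈ L, x ∈ concat := fun x hx => ((hmem x).mp hx).2
  have hLnodup : L.Nodup := by
    refine hpair.imp ?_
    intro a b hlt hab
    rw [hab] at hlt
    omega
  have hperm : L.Perm allowed :=
    (List.perm_ext_iff_of_nodup hLnodup (PySem.Set.nodup_ofList rest4)).mpr hmemA
  -- B's rank table computes the first-occurrence index in concat
  set rank : PySem.Dict String Int :=
    (PySem.List.enumerate concat 0).foldl (fun d p => d.setdefault p.2 p.1) PySem.Dict.empty with hrank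
  have hkey : ∀ a ∈ concat, rank.getD a 0 = (concat.idxOf a : Int) := by
    intro a ha
    have h1 := rank_fold_get? concat 0 PySem.Dict.empty a
    rw [idxOf?_of_mem a concat ha] at h1
    rw [← hrank] at h1
    simp only [PySem.Dict.get?_empty, Option.none_or] at h1
    simp [PySem.Dict.getD_eq_get?_getD, h1]
  -- L is strictly increasing under B's sort key
  have hpairkey : L.Pairwise (fun a b => rank.getD a 0 < rank.getD b 0) := by
    refine List.Pairwise.imp_of_mem ?_ hpair
    intro a b ha hb hlt
    rw [hkey a (hLsub a ha), hkey b (hLsub b hb)]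
    exact_mod_cast hlt
  have hsorted := PySem.List.sorted_eq_of_perm_of_pairwise_lt allowed L
    (fun t => rank.getD t 0) hperm hpairkey
  exact (congrArg (fun l => PySem.List.slice l none (some limit)) hsorted).symm
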